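-- pv_equiv track=rewrite | github.com/Xaephare/rust-crossbreed-calc | non_bin_crossbreeder.py | add_fitness
-- ===== SOURCE A (Python) =====
-- def add_fitness(plants):
--     """Returns the fitness of a plant"""
--     fit_plants = []
--     for plant in plants:
--         fitness = 0
--         for gene in plant:
--             gene_count = plant.count(gene)
--             if gene_count > 4:
--                 fitness += 0
--             elif gene == 'Y' or gene == 'G':
--                 fitness += 2
--             elif gene == 'W' or gene == 'X':
--                 fitness += 0
--             else:
--                 fitness += 1
--         rated_plant = (fitness, plant)
--         fit_plants.append(rated_plant)
--     sorted_plants = sorted(fit_plants, key=lambda x: x[0], reverse=True)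
--     return sorted_plants
-- ===== SOURCE B (Python) =====
-- def add_fitness(plants):
--     """Returns the fitness of a plant"""
--     def value(g):
--         if g in 'YG':
--             return 2
--         if g in 'WX':
--             return 0
--         return 1
--     rated = [(sum(0 if plant.count(g) > 4 else value(g) * plant.count(g)
--                   for g in set(plant)), plant)
--              for plant in plants]
--     return sorted(rated, key=lambda x: x[0], reverse=True)
-- ===== Notes on version B (the rewrite author's own statement) =====
-- stated objective: alternative
-- what changed: B rates each plant by summing value(g)*count(g) over the SET of distinct genes (zeroing genes with count > 4) inside a list comprehension, instead of A's explicit append loop that scans per position and adds a per-position contribution.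
import Mathlib
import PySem

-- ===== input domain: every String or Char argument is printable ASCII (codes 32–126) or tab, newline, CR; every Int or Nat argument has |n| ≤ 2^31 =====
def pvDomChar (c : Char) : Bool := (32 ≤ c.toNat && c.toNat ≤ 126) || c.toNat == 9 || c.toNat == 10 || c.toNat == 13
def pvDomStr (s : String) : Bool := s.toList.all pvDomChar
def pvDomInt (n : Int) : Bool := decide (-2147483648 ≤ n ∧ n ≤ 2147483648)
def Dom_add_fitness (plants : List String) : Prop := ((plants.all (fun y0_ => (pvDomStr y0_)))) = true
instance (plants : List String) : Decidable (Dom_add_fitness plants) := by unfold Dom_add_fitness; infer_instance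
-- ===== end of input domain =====

-- ===== PORT A =====
-- B rates each plant by summing value(g)*count(g) over the set of distinct genes
-- (zero for genes with count > 4), instead of A's per-position append loop.
-- plant.count(gene) with a single-character gene equals the character count (exact).
def add_fitness (plants : List String) : List (Int × String) :=
  let fit_plants := plants.foldl (fun fit_plants plant =>
    let fitness := plant.toList.foldl (fun fitness gene =>
      let gene_count := plant.toList.count gene
      if gene_count > 4 then fitness + 0
      else if gene == 'Y' || gene == 'G' then fitness + 2
      else if gene == 'W' || gene == 'X' then fitness + 0
      else fitness + 1) (0 : Int)
    fit_plants ++ [(fitness, plant)]) []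
  PySem.List.sorted fit_plants (fun x => x.1) true

-- ===== PORT B =====
-- 'g in "YG"' on a single character is membership in its characters (exact).
def pvValue (g : Char) : Int :=
  if ['Y', 'G'].contains g then 2
  else if ['W', 'X'].contains g then 0
  else 1

def add_fitness_alt (plants : List String) : List (Int × String) :=
  let rated := plants.map (fun plant =>
    (((PySem.Set.ofList plant.toList).map (fun g =>
        if plant.toList.count g > 4 then (0 : Int)
        else pvValue g * (plant.toList.count g : Int))).sum, plant))
  PySem.List.sorted rated (fun x => x.1) true

-- ===== PRECONDITION & SPEC =====
def Spec_add_fitness (plants : List String) (out : List (Int × String)) : Prop := out = add_fitness_alt plants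
instance (plants : List String) (out : List (Int × String)) : Decidable (Spec_add_fitness plants out) := by unfold Spec_add_fitness; infer_instance

-- ===== CLAIM (what is proved, stated in full; the proofs are below) =====
def Claim_equal_add_fitness : Prop := ∀ (plants : List String), Dom_add_fitness plants → Spec_add_fitness plants (add_fitness plants)

-- ===== LEMMAS AND PROOFS =====

-- A's contribution of one position holding gene g of a plant l
def contribA (l : List Char) (g : Char) : Int :=
  if l.count g > 4 then 0
  else if g == 'Y' || g == 'G' then 2
  else if g == 'W' || g == 'X' then 0
  else 1

lemma contribB_eq (l : List Char) (g : Char) :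
    (if l.count g > 4 then (0 : Int) else pvValue g * (l.count g : Int))
      = contribA l g * (l.count g : Int) := by
  simp only [contribA, pvValue]
  split_ifs with h1 h2 h3 h4 h5 h6 <;> simp_all

lemma toFinset_ofList (l : List Char) : (PySem.Set.ofList l).toFinset = l.toFinset := by
  ext x; simp [List.mem_toFinset, PySem.Set.mem_ofList]

lemma sum_dedup_count (l : List Char) (f : Char → Int) :
    ((PySem.Set.ofList l).map (fun g => f g * (l.count g : Int))).sum = (l.map f).sum := by
  rw [Finset.sum_list_map_count l f,
      Finset.sum_list_map_count (PySem.Set.ofList l) (fun g => f g * (l.count g : Int))]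
  rw [toFinset_ofList]
  refine Finset.sum_congr rfl ?_
  intro x hx
  have hn : (PySem.Set.ofList l).count x = 1 := by
    have := PySem.Set.nodup_ofList l
    rw [List.count_eq_one_of_mem this]
    rw [PySem.Set.mem_ofList]
    simpa [List.mem_toFinset] using hx
  rw [hn]
  simp [mul_comm]

lemma fitness_eq (l : List Char) :
    l.foldl (fun fitness gene =>
      let gene_count := l.count gene
      if gene_count > 4 then fitness + 0
      else if gene == 'Y' || gene == 'G' then fitness + 2
      else if gene == 'W' || gene == 'X' then fitness + 0
      else fitness + 1) (0 : Int)
    = ((PySem.Set.ofList l).map (fun g =>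
        if l.count g > 4 then (0 : Int)
        else pvValue g * (l.count g : Int))).sum := by
  have hA : (l.foldl (fun fitness gene =>
      let gene_count := l.count gene
      if gene_count > 4 then fitness + 0
      else if gene == 'Y' || gene == 'G' then fitness + 2
      else if gene == 'W' || gene == 'X' then fitness + 0
      else fitness + 1) (0 : Int)) = l.foldl (fun acc x => acc + contribA l x) 0 := by
    congr 1
    funext acc x
    simp only [contribA]
    split_ifs <;> omega
  rw [hA, PySem.List.foldl_add]
  simp only [contribB_eq, zero_add]
  rw [sum_dedup_count]

theorem add_fitness_spec : Claim_equal_add_fitness := by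
  intro plants _
  unfold Spec_add_fitness add_fitness add_fitness_alt
  rw [PySem.List.foldl_append_singleton_eq_map]
  simp only [List.nil_append]
  congr 1
  refine List.map_congr_left ?_
  intro p _
  simp only [fitness_eq]
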